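-- pv_equiv track=rewrite | github.com/Gretel-yt/IDSCN | idscn/main.py | getTopLocs
-- ===== SOURCE A (Python) =====
-- def getTopLocs(count, num):
--     i = 0
--     c = 0
--     locs = []
--     while c < num:
--         c += count[i][1][0]
--         locs += count[i][1][1]
--         i += 1
--     return locs
-- ===== SOURCE B (Python) =====
-- def getTopLocs(count, num):
--     # Recursive decomposition: no index, no running total, no accumulator list.
--     # Take the first group's locations and recurse with the remaining target.
--     if num <= 0:
--         return []
--     head = count[0]
--     return head[1][1] + getTopLocs(count[1:], num - head[1][0])
-- ===== Notes on version B (the rewrite author's own statement) =====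
-- stated objective: alternative
-- what changed: Replaced the iterative while-loop that maintains an index, a running total and a growing accumulator with a structural recursion that subtracts each group's count from the remaining target and cons-prepends its locations, with no loop state at all.
import Mathlib
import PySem

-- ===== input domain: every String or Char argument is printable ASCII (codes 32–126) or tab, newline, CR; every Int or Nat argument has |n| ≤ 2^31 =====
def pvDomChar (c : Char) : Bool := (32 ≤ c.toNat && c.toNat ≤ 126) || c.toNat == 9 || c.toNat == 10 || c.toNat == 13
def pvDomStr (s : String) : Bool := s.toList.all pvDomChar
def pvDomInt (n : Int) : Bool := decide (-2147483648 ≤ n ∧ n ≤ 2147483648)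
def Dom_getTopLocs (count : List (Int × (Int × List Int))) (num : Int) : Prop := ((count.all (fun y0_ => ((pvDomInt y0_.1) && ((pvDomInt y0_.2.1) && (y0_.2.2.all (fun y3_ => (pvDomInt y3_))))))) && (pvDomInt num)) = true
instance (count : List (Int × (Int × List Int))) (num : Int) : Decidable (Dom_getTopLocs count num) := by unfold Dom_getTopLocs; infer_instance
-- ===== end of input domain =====

-- B replaces A's stateful while-loop (index, running total, accumulator) by a structural
-- recursion subtracting each group's count from the remaining target; same values, no speed claim.

-- ===== PORT A =====
-- A's while loop: i walks the list, c accumulates counts, locs accumulates locations.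
-- When the list runs out with c < num, Python raises IndexError (excluded by Pre_).
def getTopLocsGo (num : Int) : List (Int × (Int × List Int)) → Int → List Int → List Int
  | [], _, locs => locs
  | p :: rest, c, locs =>
      if c < num then getTopLocsGo num rest (c + p.2.1) (locs ++ p.2.2) else locs

def getTopLocs (count : List (Int × (Int × List Int))) (num : Int) : List Int :=
  getTopLocsGo num count 0 []

-- ===== PORT B =====
-- B's recursion: if num ≤ 0 return []; else head's locations ++ recurse on the tail with
-- the reduced target. Python's count[0] raises IndexError on [] with num > 0 (excluded by Pre_).
def getTopLocs_alt (count : List (Int × (Int × List Int))) (num : Int) : List Int :=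
  if num ≤ 0 then []
  else
    match count with
    | [] => []  -- Python raises IndexError here; outside Pre_
    | head :: rest => head.2.2 ++ getTopLocs_alt rest (num - head.2.1)

-- ===== PRECONDITION & SPEC =====
-- Pre_ excludes exactly the inputs where A raises IndexError: the running count must reach
-- num within the list, i.e. some prefix sum of the per-group counts is ≥ num (k = 0 covers num ≤ 0).
def Pre_getTopLocs (count : List (Int × (Int × List Int))) (num : Int) : Prop :=
  ∃ k ≤ count.length, num ≤ ((count.take k).map (fun p => p.2.1)).sum
instance (count : List (Int × (Int × List Int))) (num : Int) : Decidable (Pre_getTopLocs count num) := by unfold Pre_getTopLocs; infer_instance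

def pvWitness_getTopLocs : (List (Int × (Int × List Int))) × Int :=
  ([(1, (2, [10, 11])), (2, (3, [20]))], 3)

def Spec_getTopLocs (count : List (Int × (Int × List Int))) (num : Int) (out : List Int) : Prop := out = getTopLocs_alt count num
instance (count : List (Int × (Int × List Int))) (num : Int) (out : List Int) : Decidable (Spec_getTopLocs count num out) := by unfold Spec_getTopLocs; infer_instance

-- ===== CLAIM =====
def Claim_equal_getTopLocs : Prop := ∀ (count : List (Int × (Int × List Int))) (num : Int), Dom_getTopLocs count num → Pre_getTopLocs count num → Spec_getTopLocs count num (getTopLocs count num)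

-- ===== LEMMAS AND PROOFS =====

-- Loop invariant: the accumulator is a prefix of the final answer, and the remaining
-- computation is B's recursion on the remaining target num - c.
theorem getTopLocs_main (num : Int) (l : List (Int × (Int × List Int))) :
    ∀ c locs, getTopLocsGo num l c locs = locs ++ getTopLocs_alt l (num - c) := by
  induction l with
  | nil => intro c locs; simp [getTopLocsGo, getTopLocs_alt]
  | cons p rest ih =>
      intro c locs
      simp only [getTopLocsGo]
      split_ifs with h
      · rw [ih (c + p.2.1) (locs ++ p.2.2)]
        rw [getTopLocs_alt]
        rw [if_neg (by omega)]
        simp only [List.append_assoc]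
        have e : num - (c + p.2.1) = num - c - p.2.1 := by ring
        rw [e]
      · rw [getTopLocs_alt, if_pos (by omega)]
        simp

-- ===== VERDICT =====
theorem getTopLocs_spec : Claim_equal_getTopLocs := by
  intro count num _ _
  unfold Spec_getTopLocs getTopLocs
  simpa using getTopLocs_main num count 0 []
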